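-- pv_equiv track=rewrite | github.com/antoinedang/GameAIAgent | caching/create_is_square_map.py | _formsSquare
-- ===== SOURCE A (Python) =====
-- def _formsSquare(pieces):
--     min_x = 100
--     max_x = -100
--     min_y = 100
--     max_y = -100
--     for piece in pieces:
--         x,y = piece
--         if x > max_x: max_x = x
--         if x < min_x: min_x = x
--         if y > max_y: max_y = y
--         if y < min_y: min_y = y
--
--     return (max_x - min_x) == 1 and (max_y - min_y) == 1
-- ===== SOURCE B (Python) =====
-- def _adjacentPair(vals, v):
--     # v is one of the values; they span a unit interval iff they are
--     # exactly two consecutive integers, i.e. {v-1, v} or {v, v+1}.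
--     return vals == {v, v + 1} or vals == {v - 1, v}
--
--
-- def _formsSquare(pieces):
--     if not pieces:
--         return False
--     x0, y0 = pieces[0]
--     return _adjacentPair({x for x, y in pieces}, x0) \
--        and _adjacentPair({y for x, y in pieces}, y0)
-- ===== Notes on version B (the rewrite author's own statement) =====
-- stated objective: alternative
-- what changed: Instead of tracking four extremes and testing the ranges, B collects the distinct x- and y-coordinate sets and compares each against the two candidate consecutive pairs anchored at the first piece.
-- intended difference: On nonempty inputs where all x-coordinates or all y-coordinates lie strictly beyond A's hard-coded ±100 sentinels, A's clamped bounding box is wrong: e.g. for the single piece (101,101) A returns True though one piece cannot span a unit square, and A returns False on genuine unit squares placed beyond the sentinels; B returns whether the pieces themselves span a 1x1 bounding box, the intended value. — e.g. on _formsSquare([(101, 101)]): A returns true, B returns false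
import Mathlib
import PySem

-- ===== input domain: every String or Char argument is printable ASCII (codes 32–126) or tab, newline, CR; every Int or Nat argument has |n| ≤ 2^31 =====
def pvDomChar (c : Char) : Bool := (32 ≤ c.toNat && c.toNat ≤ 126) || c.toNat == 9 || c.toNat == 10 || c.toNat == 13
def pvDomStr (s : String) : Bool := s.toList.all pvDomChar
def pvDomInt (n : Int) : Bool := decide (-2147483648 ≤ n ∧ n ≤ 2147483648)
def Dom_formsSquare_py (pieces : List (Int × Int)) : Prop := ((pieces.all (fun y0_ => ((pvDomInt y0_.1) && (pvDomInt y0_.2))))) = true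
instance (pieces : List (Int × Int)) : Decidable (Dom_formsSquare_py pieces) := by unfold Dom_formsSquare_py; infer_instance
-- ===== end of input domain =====

-- B tests the distinct coordinate sets against the two candidate consecutive pairs anchored at the first piece, instead of tracking extremes; A's ±100 sentinels make it wrong where all coordinates of an axis lie beyond them (see D_).

-- ===== PORT A =====
def formsSquare_py (pieces : List (Int × Int)) : Bool :=
  let st := pieces.foldl
    (fun (s : Int × Int × Int × Int) piece =>
      let (min_x, max_x, min_y, max_y) := s
      let (x, y) := piece
      let max_x := if x > max_x then x else max_x
      let min_x := if x < min_x then x else min_x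
      let max_y := if y > max_y then y else max_y
      let min_y := if y < min_y then y else min_y
      (min_x, max_x, min_y, max_y))
    (100, -100, 100, -100)
  decide ((st.2.1 - st.1) = 1) && decide ((st.2.2.2 - st.2.2.1) = 1)

-- ===== PORT B =====
-- vals == {v, v+1} or vals == {v-1, v}  (Python set equality = Set.equal)
def adjacentPair (vals : PySem.Set Int) (v : Int) : Bool :=
  PySem.Set.equal vals (PySem.Set.ofList [v, v + 1]) ||
  PySem.Set.equal vals (PySem.Set.ofList [v - 1, v])

def formsSquare_py_alt (pieces : List (Int × Int)) : Bool :=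
  match pieces with
  | [] => false
  | (x0, y0) :: _ =>
    adjacentPair (PySem.Set.ofList (pieces.map Prod.fst)) x0 &&
    adjacentPair (PySem.Set.ofList (pieces.map Prod.snd)) y0

-- ===== PRECONDITION & SPEC =====
-- closed-form axis predicates used by D_ (on one coordinate list)
def pvSent (vs : List Int) : Prop := (∀ v ∈ vs, 100 < v) ∨ (∀ v ∈ vs, v < -100)
def pvConst (vs : List Int) : Prop := (∀ v ∈ vs, v = 101) ∨ (∀ v ∈ vs, v = -101)
def pvAdj (vs : List Int) : Prop := ∃ a ∈ vs, (∀ v ∈ vs, v = a ∨ v = a + 1) ∧ (a + 1) ∈ vs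
def pvAAxis (vs : List Int) : Prop := pvConst vs ∨ (¬ pvSent vs ∧ pvAdj vs)

-- On nonempty inputs whose x-coordinates or y-coordinates all lie strictly beyond A's hard-coded ±100 sentinels, A's clamped bounding box is wrong (True for the single piece (101,101), False for a genuine unit square beyond 100); B returns whether the pieces themselves span a 1×1 bounding box, the intended value.
def D_formsSquare_py (pieces : List (Int × Int)) : Prop :=
  pieces ≠ [] ∧
  (pvSent (pieces.map Prod.fst) ∨ pvSent (pieces.map Prod.snd)) ∧
  ((pvAdj (pieces.map Prod.fst) ∧ pvAdj (pieces.map Prod.snd)) ∨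
   (pvAAxis (pieces.map Prod.fst) ∧ pvAAxis (pieces.map Prod.snd)))
instance (pieces : List (Int × Int)) : Decidable (D_formsSquare_py pieces) := by
  unfold D_formsSquare_py pvAAxis pvSent pvConst pvAdj; infer_instance

def Spec_formsSquare_py (pieces : List (Int × Int)) (out : Bool) : Prop :=
  ¬ D_formsSquare_py pieces → out = formsSquare_py_alt pieces
instance (pieces : List (Int × Int)) (out : Bool) : Decidable (Spec_formsSquare_py pieces out) := by
  unfold Spec_formsSquare_py; infer_instance

def pvDiffWitness_formsSquare_py : (List (Int × Int)) := [(101, 101)]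
def pvDiffWitnessOut_formsSquare_py : Bool × Bool := (true, false)

-- ===== CLAIM (what is proved, stated in full; the proofs are below) =====
def Claim_unchanged_formsSquare_py : Prop :=
  ∀ (pieces : List (Int × Int)), Dom_formsSquare_py pieces →
    Spec_formsSquare_py pieces (formsSquare_py pieces)
def Claim_changed_formsSquare_py : Prop :=
  Dom_formsSquare_py (pvDiffWitness_formsSquare_py) ∧
  D_formsSquare_py (pvDiffWitness_formsSquare_py) ∧
  formsSquare_py (pvDiffWitness_formsSquare_py) = pvDiffWitnessOut_formsSquare_py.1 ∧
  formsSquare_py_alt (pvDiffWitness_formsSquare_py) = pvDiffWitnessOut_formsSquare_py.2 ∧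
  pvDiffWitnessOut_formsSquare_py.1 ≠ pvDiffWitnessOut_formsSquare_py.2
def Claim_exact_formsSquare_py : Prop :=
  ∀ (pieces : List (Int × Int)), Dom_formsSquare_py pieces →
    D_formsSquare_py pieces → formsSquare_py pieces ≠ formsSquare_py_alt pieces

-- ===== LEMMAS AND PROOFS =====

theorem pvLoop_eq_folds (pieces : List (Int × Int)) (a b c d : Int) :
    pieces.foldl
      (fun (s : Int × Int × Int × Int) piece =>
        let (min_x, max_x, min_y, max_y) := s
        let (x, y) := piece
        let max_x := if x > max_x then x else max_x
        let min_x := if x < min_x then x else min_x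
        let max_y := if y > max_y then y else max_y
        let min_y := if y < min_y then y else min_y
        (min_x, max_x, min_y, max_y))
      (a, b, c, d)
    = ((pieces.map Prod.fst).foldl min a,
       (pieces.map Prod.fst).foldl max b,
       (pieces.map Prod.snd).foldl min c,
       (pieces.map Prod.snd).foldl max d) := by
  induction pieces generalizing a b c d with
  | nil => rfl
  | cons p t ih =>
    obtain ⟨x, y⟩ := p
    simp only [List.foldl_cons, List.map_cons]
    rw [ih]
    congr 1 <;> [skip; congr 1] <;> [skip; skip; congr 1]
    all_goals congr 1
    all_goals omega

theorem pv_le_foldl_max (vs : List Int) (b : Int) : b ≤ vs.foldl max b := by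
  induction vs generalizing b with
  | nil => simp
  | cons v t ih => exact le_trans (le_max_left b v) (ih _)

theorem pv_foldl_min_le (vs : List Int) (b : Int) : vs.foldl min b ≤ b := by
  induction vs generalizing b with
  | nil => simp
  | cons v t ih => exact le_trans (ih _) (min_le_left b v)

theorem pv_mem_le_foldl_max (vs : List Int) (b v : Int) (hv : v ∈ vs) :
    v ≤ vs.foldl max b := by
  induction vs generalizing b with
  | nil => cases hv
  | cons w t ih =>
    rcases List.mem_cons.mp hv with h | h
    · subst h; exact le_trans (le_max_right b v) (pv_le_foldl_max t _)
    · exact ih _ h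

theorem pv_foldl_min_le_mem (vs : List Int) (b v : Int) (hv : v ∈ vs) :
    vs.foldl min b ≤ v := by
  induction vs generalizing b with
  | nil => cases hv
  | cons w t ih =>
    rcases List.mem_cons.mp hv with h | h
    · subst h; exact le_trans (pv_foldl_min_le t _) (min_le_right b v)
    · exact ih _ h

theorem pv_foldl_max_cases (vs : List Int) (b : Int) :
    vs.foldl max b = b ∨ vs.foldl max b ∈ vs := by
  induction vs generalizing b with
  | nil => exact Or.inl rfl
  | cons v t ih =>
    rcases ih (max b v) with h | h
    · simp only [List.foldl_cons]
      by_cases hb : v ≤ b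
      · left; rw [h]; omega
      · right; rw [h]
        have hbv : max b v = v := by omega
        rw [hbv]; simp
    · exact Or.inr (List.mem_cons_of_mem _ h)

theorem pv_foldl_min_cases (vs : List Int) (b : Int) :
    vs.foldl min b = b ∨ vs.foldl min b ∈ vs := by
  induction vs generalizing b with
  | nil => exact Or.inl rfl
  | cons v t ih =>
    rcases ih (min b v) with h | h
    · simp only [List.foldl_cons]
      by_cases hb : b ≤ v
      · left; rw [h]; omega
      · right; rw [h]
        have hbv : min b v = v := by omega
        rw [hbv]; simp
    · exact Or.inr (List.mem_cons_of_mem _ h)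

-- the per-axis characterisation of A's clamped range test
theorem pv_axisA_iff (vs : List Int) :
    (vs.foldl max (-100) - vs.foldl min 100 = 1) ↔ (vs ≠ [] ∧ pvAAxis vs) := by
  constructor
  · intro h
    have hne : vs ≠ [] := by
      rintro rfl; simp at h
    refine ⟨hne, ?_⟩
    have hMc := pv_foldl_max_cases vs (-100)
    have hmc := pv_foldl_min_cases vs 100
    set M := vs.foldl max (-100) with hM
    set m := vs.foldl min 100 with hm
    have hub : ∀ v ∈ vs, v ≤ M := fun v hv => pv_mem_le_foldl_max vs _ v hv
    have hlb : ∀ v ∈ vs, m ≤ v := fun v hv => pv_foldl_min_le_mem vs _ v hv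
    have hMinit : (-100 : Int) ≤ M := pv_le_foldl_max vs _
    have hminit : m ≤ (100 : Int) := pv_foldl_min_le vs _
    rcases hMc with hM0 | hMmem
    · -- M = -100 : all elements ≤ -100, and m = -101 ∈ vs
      have hm101 : m = -101 := by omega
      have hmmem : m ∈ vs := by
        rcases hmc with h' | h'
        · omega
        · exact h'
      by_cases hall : ∀ v ∈ vs, v = -101
      · exact Or.inl (Or.inr hall)
      · push_neg at hall
        obtain ⟨w, hwmem, hwne⟩ := hall
        have hw : w = -100 := by
          have := hub w hwmem; have := hlb w hwmem; omega
        refine Or.inr ⟨?_, ⟨-101, by rw [← hm101]; exact hmmem, ?_, ?_⟩⟩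
        · rintro (hs | hs)
          · have := hs m hmmem; omega
          · have := hs w hwmem; omega
        · intro v hv; have := hub v hv; have := hlb v hv; omega
        · rw [show (-101 : Int) + 1 = -100 by norm_num, ← hw]; exact hwmem
    · rcases hmc with hm0 | hmmem
      · -- m = 100 : all elements ≥ 100, M = 101 ∈ vs
        have hM101 : M = 101 := by omega
        by_cases hall : ∀ v ∈ vs, v = 101
        · exact Or.inl (Or.inl hall)
        · push_neg at hall
          obtain ⟨w, hwmem, hwne⟩ := hall
          have hw : w = 100 := by
            have := hub w hwmem; have := hlb w hwmem; omega
          refine Or.inr ⟨?_, ⟨100, by rw [← hw]; exact hwmem, ?_, ?_⟩⟩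
          · rintro (hs | hs)
            · have := hs w hwmem; omega
            · have := hs M hMmem; omega
          · intro v hv; have := hub v hv; have := hlb v hv; omega
          · rw [show (100 : Int) + 1 = 101 by norm_num, ← hM101]; exact hMmem
      · -- both extremes are elements: the genuine unit-range case
        refine Or.inr ⟨?_, ⟨m, hmmem, ?_, ?_⟩⟩
        · rintro (hs | hs)
          · have := hs m hmmem; omega
          · have := hs M hMmem; omega
        · intro v hv; have := hub v hv; have := hlb v hv; omega
        · rw [show m + 1 = M by omega]; exact hMmem
  · rintro ⟨hne, hA⟩
    obtain ⟨w, hwmem⟩ := List.exists_mem_of_ne_nil vs hne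
    have hMc := pv_foldl_max_cases vs (-100)
    have hmc := pv_foldl_min_cases vs 100
    set M := vs.foldl max (-100) with hM
    set m := vs.foldl min 100 with hm
    have hub : ∀ v ∈ vs, v ≤ M := fun v hv => pv_mem_le_foldl_max vs _ v hv
    have hlb : ∀ v ∈ vs, m ≤ v := fun v hv => pv_foldl_min_le_mem vs _ v hv
    have hMinit : (-100 : Int) ≤ M := pv_le_foldl_max vs _
    have hminit : m ≤ (100 : Int) := pv_foldl_min_le vs _
    rcases hA with (hc | hc) | ⟨hns, a, hamem, hall, ha1⟩
    · -- all = 101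
      have hw101 := hc w hwmem
      have hM101 : M = 101 := by
        have h1 := hub w hwmem
        rcases hMc with h' | h'
        · omega
        · have := hc M h'; omega
      have hm100 : m = 100 := by
        rcases hmc with h' | h'
        · omega
        · have := hc m h'; have := hlb w hwmem; omega
      omega
    · -- all = -101
      have hw101 := hc w hwmem
      have hM100 : M = -100 := by
        rcases hMc with h' | h'
        · omega
        · have := hc M h'; omega
      have hm101 : m = -101 := by
        rcases hmc with h' | h'
        · have := hlb w hwmem; omega
        · have := hc m h'; omega
      omega
    · -- two consecutive values a, a+1, both present, not all beyond the sentinels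
      unfold pvSent at hns
      push_neg at hns
      obtain ⟨⟨u, humem, hu⟩, ⟨z, hzmem, hz⟩⟩ := hns
      have hua := hall u humem
      have hza := hall z hzmem
      have ha_le : a ≤ 100 := by omega
      have ha1_ge : (-100 : Int) ≤ a + 1 := by omega
      have hMa : M = a + 1 := by
        have h1 := hub a hamem
        have h2 := pv_mem_le_foldl_max vs (-100) (a + 1) ha1
        rcases hMc with h' | h'
        · omega
        · rcases hall M h' with h'' | h'' <;> omega
      have hma : m = a := by
        have h1 := hlb a hamem
        rcases hmc with h' | h'
        · omega
        · rcases hall m h' with h'' | h'' <;> omega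
      omega

theorem pv_A_char (pieces : List (Int × Int)) :
    formsSquare_py pieces = true ↔
      (pieces ≠ [] ∧ pvAAxis (pieces.map Prod.fst) ∧ pvAAxis (pieces.map Prod.snd)) := by
  unfold formsSquare_py
  rw [pvLoop_eq_folds]
  simp only [Bool.and_eq_true, decide_eq_true_eq]
  rw [pv_axisA_iff, pv_axisA_iff]
  have hx : pieces.map Prod.fst ≠ [] ↔ pieces ≠ [] := by simp
  have hy : pieces.map Prod.snd ≠ [] ↔ pieces ≠ [] := by simp
  constructor
  · rintro ⟨⟨h1, h2⟩, ⟨h3, h4⟩⟩; exact ⟨hx.mp h1, h2, h4⟩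
  · rintro ⟨h1, h2, h3⟩; exact ⟨⟨hx.mpr h1, h2⟩, ⟨hy.mpr h1, h3⟩⟩

theorem pv_adjacentPair_iff (vs : List Int) (v : Int) (hv : v ∈ vs) :
    adjacentPair (PySem.Set.ofList vs) v = true ↔ pvAdj vs := by
  unfold adjacentPair
  simp only [Bool.or_eq_true, PySem.Set.equal_iff, PySem.Set.mem_ofList,
    List.mem_cons, List.not_mem_nil, or_false]
  constructor
  · rintro (heq | heq)
    · refine ⟨v, (heq v).mpr (Or.inl rfl), fun w hw => (heq w).mp hw, (heq (v + 1)).mpr (Or.inr rfl)⟩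
    · refine ⟨v - 1, (heq (v - 1)).mpr (Or.inl rfl), fun w hw => ?_, by
        rw [show v - 1 + 1 = v by ring]; exact (heq v).mpr (Or.inr rfl)⟩
      rcases (heq w).mp hw with h | h
      · exact Or.inl h
      · right; omega
  · rintro ⟨a, hamem, hall, ha1⟩
    rcases hall v hv with hva | hva
    · left; intro w
      constructor
      · intro hw; rcases hall w hw with h | h
        · left; omega
        · right; omega
      · rintro (h | h)
        · rw [h, hva]; exact hamem
        · rw [h, hva]; exact ha1
    · right; intro w
      constructor
      · intro hw; rcases hall w hw with h | h
        · left; omega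
        · right; omega
      · rintro (h | h)
        · rw [show w = a from by omega]; exact hamem
        · rw [show w = a + 1 from by omega]; exact ha1

theorem pv_B_char (pieces : List (Int × Int)) :
    formsSquare_py_alt pieces = true ↔
      (pieces ≠ [] ∧ pvAdj (pieces.map Prod.fst) ∧ pvAdj (pieces.map Prod.snd)) := by
  match pieces with
  | [] => simp [formsSquare_py_alt]
  | (x0, y0) :: t =>
    have hx : x0 ∈ ((x0, y0) :: t).map Prod.fst := by simp
    have hy : y0 ∈ ((x0, y0) :: t).map Prod.snd := by simp
    unfold formsSquare_py_alt
    simp only [Bool.and_eq_true]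
    rw [pv_adjacentPair_iff _ _ hx, pv_adjacentPair_iff _ _ hy]
    simp

theorem pv_const_sent (vs : List Int) (hne : vs ≠ []) : pvConst vs → pvSent vs := by
  rintro (h | h)
  · exact Or.inl (fun v hv => by have := h v hv; omega)
  · exact Or.inr (fun v hv => by have := h v hv; omega)

theorem pv_adj_not_const (vs : List Int) : pvAdj vs → ¬ pvConst vs := by
  rintro ⟨a, hamem, _, ha1⟩ (hc | hc)
  · have := hc a hamem; have := hc (a + 1) ha1; omega
  · have := hc a hamem; have := hc (a + 1) ha1; omega

theorem pv_map_ne_nil (pieces : List (Int × Int)) (f : Int × Int → Int)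
    (h : pieces ≠ []) : pieces.map f ≠ [] := by simp [h]

-- ===== VERDICT (by name: the statements are the Claim_ definitions above) =====
theorem formsSquare_py_spec : Claim_unchanged_formsSquare_py := by
  intro pieces _ hnD
  rcases hA : formsSquare_py pieces with _ | _ <;>
  rcases hB : formsSquare_py_alt pieces with _ | _
  · rfl
  · exfalso
    obtain ⟨hne, hx, hy⟩ := (pv_B_char pieces).mp hB
    by_cases hS : pvSent (pieces.map Prod.fst) ∨ pvSent (pieces.map Prod.snd)
    · exact hnD ⟨hne, hS, Or.inl ⟨hx, hy⟩⟩
    · push_neg at hS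
      have : formsSquare_py pieces = true :=
        (pv_A_char pieces).mpr ⟨hne, Or.inr ⟨hS.1, hx⟩, Or.inr ⟨hS.2, hy⟩⟩
      rw [hA] at this; cases this
  · exfalso
    obtain ⟨hne, hAx, hAy⟩ := (pv_A_char pieces).mp hA
    by_cases hS : pvSent (pieces.map Prod.fst) ∨ pvSent (pieces.map Prod.snd)
    · exact hnD ⟨hne, hS, Or.inr ⟨hAx, hAy⟩⟩
    · push_neg at hS
      have hx : pvAdj (pieces.map Prod.fst) := by
        rcases hAx with hc | hc
        · exact absurd (pv_const_sent _ (pv_map_ne_nil _ _ hne) hc) hS.1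
        · exact hc.2
      have hy : pvAdj (pieces.map Prod.snd) := by
        rcases hAy with hc | hc
        · exact absurd (pv_const_sent _ (pv_map_ne_nil _ _ hne) hc) hS.2
        · exact hc.2
      have : formsSquare_py_alt pieces = true := (pv_B_char pieces).mpr ⟨hne, hx, hy⟩
      rw [hB] at this; cases this
  · rfl

theorem formsSquare_py_changed : Claim_changed_formsSquare_py := by
  unfold Claim_changed_formsSquare_py; decide

theorem formsSquare_py_tight : Claim_exact_formsSquare_py := by
  intro pieces _ hD heq
  obtain ⟨hne, hS, hcase⟩ := hD
  rcases hcase with ⟨hx, hy⟩ | ⟨hAx, hAy⟩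
  · -- B is true, so A would be true, contradicting a sentinel-clamped axis
    have hB : formsSquare_py_alt pieces = true := (pv_B_char pieces).mpr ⟨hne, hx, hy⟩
    have hA : formsSquare_py pieces = true := by rw [heq]; exact hB
    obtain ⟨_, hAx, hAy⟩ := (pv_A_char pieces).mp hA
    rcases hS with hSx | hSy
    · rcases hAx with hc | hc
      · exact pv_adj_not_const _ hx hc
      · exact hc.1 hSx
    · rcases hAy with hc | hc
      · exact pv_adj_not_const _ hy hc
      · exact hc.1 hSy
  · -- A is true, so B would be true, contradicting a constant sentinel axis
    have hA : formsSquare_py pieces = true := (pv_A_char pieces).mpr ⟨hne, hAx, hAy⟩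
    have hB : formsSquare_py_alt pieces = true := by rw [← heq]; exact hA
    obtain ⟨_, hx, hy⟩ := (pv_B_char pieces).mp hB
    rcases hS with hSx | hSy
    · rcases hAx with hc | hc
      · exact pv_adj_not_const _ hx hc
      · exact hc.1 hSx
    · rcases hAy with hc | hc
      · exact pv_adj_not_const _ hy hc
      · exact hc.1 hSy
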